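-- pv_equiv track=rewrite | github.com/xidchen/beta_data | beta_quarterly.py | combine_table_header
-- ===== SOURCE A (Python) =====
-- def combine_table_header(header: [[str]]) -> [str]:
--     """Combine table header into one header if more than one
--         For example, the input header is,
--             [['a', 'b', 'c', 'c'], ['a', 'b', '1', '2']].
--         The output header would be,
--             ['a', 'b', 'c1', 'c2']
--     :param header: table headers in a list of lists of strings
--     :return: table header in a list of strings
--     """
--     if not header:
--         return []
--     res = []
--     for i in range(len(header[0])):
--         col_name = header[0][i]
--         for row in header[1:]:
--             if col_name != row[i]:
--                 col_name += row[i]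
--         res.append(col_name)
--     return res
-- ===== SOURCE B (Python) =====
-- def _fold_col(acc, rows, i):
--     if not rows:
--         return acc
--     cell = rows[0][i]
--     return _fold_col(acc if acc == cell else acc + cell, rows[1:], i)
--
--
-- def combine_table_header(header: [[str]]) -> [str]:
--     if not header:
--         return []
--     return [_fold_col(header[0][i], header[1:], i) for i in range(len(header[0]))]
-- ===== Notes on version B (the rewrite author's own statement) =====
-- stated objective: alternative
-- what changed: Replaces A's accumulator list with nested for-loops by a list comprehension over column indices calling a recursive per-column fold (recursion on the remaining rows instead of an inner loop, with the branch inverted to 'keep accumulator when equal').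
import Mathlib
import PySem

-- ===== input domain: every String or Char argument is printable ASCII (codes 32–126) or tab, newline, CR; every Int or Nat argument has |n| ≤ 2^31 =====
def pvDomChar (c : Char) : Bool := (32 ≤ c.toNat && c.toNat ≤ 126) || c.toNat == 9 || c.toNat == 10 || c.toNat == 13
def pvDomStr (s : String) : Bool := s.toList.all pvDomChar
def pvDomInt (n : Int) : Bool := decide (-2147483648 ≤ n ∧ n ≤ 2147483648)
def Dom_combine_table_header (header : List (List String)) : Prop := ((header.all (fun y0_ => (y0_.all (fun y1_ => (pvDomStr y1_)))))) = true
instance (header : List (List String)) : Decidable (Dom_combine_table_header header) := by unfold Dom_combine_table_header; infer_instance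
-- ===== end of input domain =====

-- B differs from A by decomposition only: a per-column recursive fold used from a comprehension,
-- instead of A's outer result-accumulator loop with an inner row loop; same cost, return value only.

-- ===== PORT A =====
-- row[i] is exact under Pre_ (index in range); the '' default is never reached inside Pre_.
def combine_table_header (header : List (List String)) : List String :=
  match header with
  | [] => []
  | h0 :: rest =>
    (PySem.List.pyRange 0 (h0.length : Int) 1).foldl
      (fun res i =>
        let col_name := PySem.List.pyGetD h0 i ""
        let col_name := rest.foldl
          (fun col_name row =>
            if col_name ≠ PySem.List.pyGetD row i "" then col_name ++ PySem.List.pyGetD row i "" else col_name)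
          col_name
        res ++ [col_name]) []

-- ===== PORT B =====
def foldColB (acc : String) (rows : List (List String)) (i : Int) : String :=
  match rows with
  | [] => acc
  | r :: rest =>
    let cell := PySem.List.pyGetD r i ""
    foldColB (if acc == cell then acc else acc ++ cell) rest i

def combine_table_header_alt (header : List (List String)) : List String :=
  match header with
  | [] => []
  | h0 :: rest =>
    (PySem.List.pyRange 0 (h0.length : Int) 1).map
      (fun i => foldColB (PySem.List.pyGetD h0 i "") rest i)

-- ===== PRECONDITION & SPEC =====
-- Pre_ excludes exactly the ragged tables on which Python A raises IndexError
-- (some row after the first shorter than the first row).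
def Pre_combine_table_header (header : List (List String)) : Prop :=
  ∀ row ∈ header.tail, (header.headD []).length ≤ row.length
instance (header : List (List String)) : Decidable (Pre_combine_table_header header) := by
  unfold Pre_combine_table_header; infer_instance

def pvWitness_combine_table_header : List (List String) :=
  [["a", "b", "c", "c"], ["a", "b", "1", "2"]]

def Spec_combine_table_header (header : List (List String)) (out : List String) : Prop := out = combine_table_header_alt header
instance (header : List (List String)) (out : List String) : Decidable (Spec_combine_table_header header out) := by unfold Spec_combine_table_header; infer_instance

-- ===== CLAIM (what is proved, stated in full; the proofs are below) =====
def Claim_equal_combine_table_header : Prop := ∀ (header : List (List String)), Dom_combine_table_header header → Pre_combine_table_header header → Spec_combine_table_header header (combine_table_header header)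

-- ===== LEMMAS AND PROOFS =====

-- The inner row-loop of A equals B's recursive per-column fold.
theorem inner_eq (rows : List (List String)) (acc : String) (i : Int) :
    rows.foldl
      (fun col row =>
        if col ≠ PySem.List.pyGetD row i "" then col ++ PySem.List.pyGetD row i "" else col)
      acc = foldColB acc rows i := by
  induction rows generalizing acc with
  | nil => rfl
  | cons r rest ih =>
    rw [List.foldl_cons, foldColB, ← ih]
    congr 1
    by_cases h : acc = PySem.List.pyGetD r i "" <;> simp [h]

-- A's append-accumulator loop over a list equals mapping.
theorem foldl_append_singleton (l : List Int) (f : Int → String) (acc : List String) :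
    l.foldl (fun res i => res ++ [f i]) acc = acc ++ l.map f := by
  induction l generalizing acc with
  | nil => simp
  | cons x xs ih => simp [List.foldl, ih]

-- ===== VERDICT (by name: the statement is the Claim_ definition above) =====
theorem combine_table_header_spec : Claim_equal_combine_table_header := by
  intro header _ _
  unfold Spec_combine_table_header combine_table_header combine_table_header_alt
  cases header with
  | nil => rfl
  | cons h0 rest =>
    simp only [inner_eq]
    rw [foldl_append_singleton]
    simp
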